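-- pv_equiv track=rewrite | github.com/KiseongLee/AlgorithmStudy | ProgrammersHighscoreKit/셔틀버스.py | solution
-- ===== SOURCE A (Python) =====
-- def solution(n, t, m, timetable):
--
--     crewtime = [int(time[:2])*60 + int(time[3:]) for time in timetable]
--     crewtime.sort()
--     bus_time = [540 + t*i for i in range(n)]
--
--     i = 0       # 다음에 버스에 오를 크루의 인덱스
--     for tm in bus_time:
--       cnt = 0   # 버스에 타는 크루 수
--       while cnt < m and i < len(crewtime) and crewtime[i] <= tm:
--         i += 1
--         cnt += 1
--       # 버스에 자리가 남았을 경우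
--       if cnt < m:
--         answer = tm
--       # 버스에 자리가 없는 경우 맨 마지막 크루보다 1분 먼저 도착
--       else:
--         answer = crewtime[i-1]-1
--
--     return str(answer//60).zfill(2) + ":" + str(answer%60).zfill(2)
--
--     return answer
-- ===== SOURCE B (Python) =====
-- def solution(n, t, m, timetable):
--     crewtime = sorted(int(s[:2]) * 60 + int(s[3:]) for s in timetable)
--
--     def le_count(x):
--         # number of crew arrival times <= x (binary search, crewtime is sorted)
--         lo, hi = 0, len(crewtime)
--         while lo < hi:
--             mid = (lo + hi) // 2
--             if crewtime[mid] <= x: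
--                 lo = mid + 1
--             else:
--                 hi = mid
--         return lo
--
--     i = 0  # crew already boarded on earlier buses
--     for k in range(n):
--         tm = 540 + t * k
--         board = min(m, max(0, le_count(tm) - i))
--         i += board
--         answer = tm if board < m else crewtime[i - 1] - 1
--     return str(answer // 60).zfill(2) + ":" + str(answer % 60).zfill(2)
-- ===== Notes on version B (the rewrite author's own statement) =====
-- stated objective: alternative
-- what changed: The per-bus inner while-scan that walks the pointer one crew at a time is replaced by a hand-written binary search (bisect_right) over the sorted arrival times: the boarding count is computed arithmetically as min(m, max(0, le_count(tm) - i)) and the pointer advanced in one step.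
-- outside the precondition, e.g. on solution(1, 0, -1, ['00:10']): A returns '00:09', B raises IndexError
import Mathlib
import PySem

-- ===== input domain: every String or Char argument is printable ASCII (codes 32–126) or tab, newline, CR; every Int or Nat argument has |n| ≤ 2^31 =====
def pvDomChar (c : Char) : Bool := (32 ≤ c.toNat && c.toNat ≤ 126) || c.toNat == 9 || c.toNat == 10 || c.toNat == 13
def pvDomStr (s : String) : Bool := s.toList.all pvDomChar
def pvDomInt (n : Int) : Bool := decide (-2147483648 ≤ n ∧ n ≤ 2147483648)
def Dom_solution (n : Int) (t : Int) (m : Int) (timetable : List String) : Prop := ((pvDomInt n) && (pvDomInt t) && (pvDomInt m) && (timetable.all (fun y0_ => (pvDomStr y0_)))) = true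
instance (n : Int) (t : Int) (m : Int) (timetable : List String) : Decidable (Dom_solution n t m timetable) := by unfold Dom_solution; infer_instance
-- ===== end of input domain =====

-- B replaces A's per-bus linear pointer walk by a hand-written binary search over the
-- sorted arrival times (same sort, boarding count computed arithmetically); same cost class.

-- ===== PORT A =====

-- int(time[:2])*60 + int(time[3:]), as both A and B parse entries; Pre_ guarantees both
-- parses succeed (else Python raises ValueError)
def parseTime (s : String) : Int :=
  (PySem.Int.ofStr? (PySem.Str.slice s none (some 2))).getD 0 * 60 +
  (PySem.Int.ofStr? (PySem.Str.slice s (some 3) none)).getD 0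

-- the inner 'while cnt < m and i < len(crewtime) and crewtime[i] <= tm'
def whileA (crew : List Int) (m tm : Int) (i cnt : Nat) : Nat × Nat :=
  if h : (cnt : Int) < m ∧ i < crew.length ∧ crew.getD i 0 ≤ tm then
    whileA crew m tm (i + 1) (cnt + 1)
  else (i, cnt)
termination_by crew.length - i
decreasing_by omega

def stepA (crew : List Int) (m : Int) (st : Nat × Int) (tm : Int) : Nat × Int :=
  let r := whileA crew m tm st.1 0
  let answer := if ((r.2 : Int)) < m then tm
                else (PySem.List.pyGet? crew ((r.1 : Int) - 1)).getD 0 - 1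
  (r.1, answer)

def solution (n : Int) (t : Int) (m : Int) (timetable : List String) : String :=
  let crewtime := PySem.List.sorted (timetable.map parseTime) (fun x => x) false
  let bus_time := (PySem.List.pyRange 0 n 1).map (fun i => 540 + t * i)
  let fin := bus_time.foldl (stepA crewtime m) (0, 0)
  PySem.Str.zfill (PySem.Int.toStr (PySem.Int.floordiv fin.2 60)) 2 ++ ":" ++
    PySem.Str.zfill (PySem.Int.toStr (PySem.Int.mod fin.2 60)) 2

-- ===== PORT B =====

-- le_count's binary-search loop: while lo < hi: mid=(lo+hi)//2; if crew[mid] <= x: lo=mid+1 else hi=mid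
def leCountLoop (crew : List Int) (x : Int) (lo hi : Nat) : Nat :=
  if h : lo < hi then
    let mid := (lo + hi) / 2
    if crew.getD mid 0 ≤ x then leCountLoop crew x (mid + 1) hi
    else leCountLoop crew x lo mid
  else lo
termination_by hi - lo
decreasing_by all_goals omega

def stepB (crew : List Int) (m t : Int) (st : Nat × Int) (k : Int) : Nat × Int :=
  let tm := 540 + t * k
  let board : Int := min m (max 0 ((leCountLoop crew tm 0 crew.length : Int) - (st.1 : Int)))
  let i' := st.1 + board.toNat
  let answer := if board < m then tm
                else (PySem.List.pyGet? crew ((i' : Int) - 1)).getD 0 - 1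
  (i', answer)

def solution_alt (n : Int) (t : Int) (m : Int) (timetable : List String) : String :=
  let crewtime := PySem.List.sorted (timetable.map parseTime) (fun x => x) false
  let fin := (PySem.List.pyRange 0 n 1).foldl (stepB crewtime m t) (0, 0)
  PySem.Str.zfill (PySem.Int.toStr (PySem.Int.floordiv fin.2 60)) 2 ++ ":" ++
    PySem.Str.zfill (PySem.Int.toStr (PySem.Int.mod fin.2 60)) 2

-- ===== PRECONDITION & SPEC =====

-- Pre_ keeps the task's natural domain: at least one bus (n ≤ 0 leaves `answer` unassigned, a
-- NameError), a nonnegative capacity (for m < 0, outside any sensible shuttle, A accidentally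
-- returns crewtime[-1]-1 via negative-index wraparound while B's pointer arithmetic raises),
-- parseable "HH:MM"-shaped entries (else int() raises ValueError), and, when m = 0, a nonempty
-- timetable (an empty one makes A index an empty list, IndexError).
def Pre_solution (n : Int) (t : Int) (m : Int) (timetable : List String) : Prop :=
  1 ≤ n ∧ 0 ≤ m ∧ (timetable = [] → 1 ≤ m) ∧
  ∀ s ∈ timetable,
    (PySem.Int.ofStr? (PySem.Str.slice s none (some 2))).isSome ∧
    (PySem.Int.ofStr? (PySem.Str.slice s (some 3) none)).isSome

instance (n : Int) (t : Int) (m : Int) (timetable : List String) : Decidable (Pre_solution n t m timetable) := by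
  unfold Pre_solution; infer_instance

def pvWitness_solution : Int × Int × Int × List String := (2, 10, 1, ["08:59", "09:05"])

def Spec_solution (n : Int) (t : Int) (m : Int) (timetable : List String) (out : String) : Prop := out = solution_alt n t m timetable
instance (n : Int) (t : Int) (m : Int) (timetable : List String) (out : String) : Decidable (Spec_solution n t m timetable out) := by unfold Spec_solution; infer_instance

-- ===== CLAIM (what is proved, stated in full; the proofs are below) =====
def Claim_equal_solution : Prop := ∀ (n : Int) (t : Int) (m : Int) (timetable : List String), Dom_solution n t m timetable → Pre_solution n t m timetable → Spec_solution n t m timetable (solution n t m timetable)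

-- ===== LEMMAS AND PROOFS =====

-- binary-search characterisation on a sorted list
theorem leCountLoop_spec (crew : List Int) (x : Int)
    (hsort : crew.Pairwise (· ≤ ·)) :
    ∀ lo hi, lo ≤ hi → hi ≤ crew.length →
      lo ≤ leCountLoop crew x lo hi ∧ leCountLoop crew x lo hi ≤ hi ∧
      (∀ j, lo ≤ j → j < leCountLoop crew x lo hi → ∀ (hj : j < crew.length), crew[j] ≤ x) ∧
      (∀ j, leCountLoop crew x lo hi ≤ j → j < hi → ∀ (hj : j < crew.length), x < crew[j]) := by
  have hmono := List.pairwise_iff_getElem.mp hsort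
  suffices h : ∀ d lo hi, hi - lo ≤ d → lo ≤ hi → hi ≤ crew.length →
      lo ≤ leCountLoop crew x lo hi ∧ leCountLoop crew x lo hi ≤ hi ∧
      (∀ j, lo ≤ j → j < leCountLoop crew x lo hi → ∀ (hj : j < crew.length), crew[j] ≤ x) ∧
      (∀ j, leCountLoop crew x lo hi ≤ j → j < hi → ∀ (hj : j < crew.length), x < crew[j]) by
    intro lo hi h1 h2; exact h (hi - lo) lo hi le_rfl h1 h2
  intro d
  induction d with
  | zero =>
    intro lo hi hd h1 h2
    have hnlt : ¬ lo < hi := by omega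
    unfold leCountLoop
    rw [dif_neg hnlt]
    exact ⟨le_rfl, h1, fun j hj1 hj2 _ => absurd hj2 (by omega),
           fun j hj1 hj2 _ => absurd hj2 (by omega)⟩
  | succ d ih =>
    intro lo hi hd h1 h2
    by_cases hlt : lo < hi
    · have hmlo : lo ≤ (lo + hi) / 2 := by omega
      have hmhi : (lo + hi) / 2 < hi := by omega
      have hmlen : (lo + hi) / 2 < crew.length := by omega
      have hgetD : crew.getD ((lo + hi) / 2) 0 = crew[(lo + hi) / 2] :=
        List.getD_eq_getElem crew 0 hmlen
      unfold leCountLoop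
      rw [dif_pos hlt]
      simp only [hgetD]
      by_cases hc : crew[(lo + hi) / 2] ≤ x
      · rw [if_pos hc]
        obtain ⟨a1, a2, a3, a4⟩ := ih ((lo + hi) / 2 + 1) hi (by omega) (by omega) h2
        refine ⟨by omega, a2, ?_, a4⟩
        intro j hj1 hj2 hj
        by_cases hjm : (lo + hi) / 2 + 1 ≤ j
        · exact a3 j hjm hj2 hj
        · rcases Nat.lt_or_ge j ((lo + hi) / 2) with hlt' | hge
          · exact le_trans (hmono j ((lo + hi) / 2) hj hmlen hlt') hc
          · have : j = (lo + hi) / 2 := by omega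
            subst this; exact hc
      · rw [if_neg hc]
        obtain ⟨a1, a2, a3, a4⟩ := ih lo ((lo + hi) / 2) (by omega) (by omega) (by omega)
        refine ⟨a1, by omega, a3, ?_⟩
        intro j hj1 hj2 hj
        by_cases hjm : j < (lo + hi) / 2
        · exact a4 j hj1 hjm hj
        · have hx : x < crew[(lo + hi) / 2] := lt_of_not_ge hc
          rcases Nat.lt_or_ge ((lo + hi) / 2) j with hlt' | hge
          · exact lt_of_lt_of_le hx (hmono ((lo + hi) / 2) j hmlen hj hlt')
          · have : j = (lo + hi) / 2 := by omega
            subst this; exact hx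
    · unfold leCountLoop
      rw [dif_neg hlt]
      exact ⟨le_rfl, h1, fun j hj1 hj2 _ => absurd hj2 (by omega),
             fun j hj1 hj2 _ => absurd (by omega : j < j) (lt_irrefl j)⟩

-- the while loop boards min(m, c - i) crew when indices < c are ≤ tm and indices ≥ c are > tm
theorem whileA_eq (crew : List Int) (m tm : Int) (c : Nat)
    (hc : c ≤ crew.length)
    (hle : ∀ j, j < c → ∀ (hj : j < crew.length), crew[j] ≤ tm)
    (hgt : ∀ j, c ≤ j → ∀ (hj : j < crew.length), tm < crew[j]) :
    ∀ i cnt, i ≤ crew.length →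
      whileA crew m tm i cnt = (i + min (m - cnt).toNat (c - i), cnt + min (m - cnt).toNat (c - i)) := by
  suffices h : ∀ d i cnt, crew.length - i ≤ d → i ≤ crew.length →
      whileA crew m tm i cnt = (i + min (m - cnt).toNat (c - i), cnt + min (m - cnt).toNat (c - i)) by
    intro i cnt hi; exact h (crew.length - i) i cnt le_rfl hi
  intro d
  induction d with
  | zero =>
    intro i cnt hd hi
    have hieq : i = crew.length := by omega
    have hcond : ¬ ((cnt : Int) < m ∧ i < crew.length ∧ crew.getD i 0 ≤ tm) := by
      rintro ⟨-, h2, -⟩; omega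
    unfold whileA
    rw [dif_neg hcond]
    have : c - i = 0 := by omega
    simp [this]
  | succ d ih =>
    intro i cnt hd hi
    by_cases hcond : (cnt : Int) < m ∧ i < crew.length ∧ crew.getD i 0 ≤ tm
    · obtain ⟨h1, h2, h3⟩ := hcond
      have hgetD : crew.getD i 0 = crew[i] := List.getD_eq_getElem crew 0 h2
      have hic : i < c := by
        by_contra hge
        exact absurd (hgetD ▸ h3) (not_le.mpr (hgt i (by omega) h2))
      unfold whileA
      rw [dif_pos ⟨h1, h2, hgetD ▸ h3⟩]
      rw [ih (i + 1) (cnt + 1) (by omega) (by omega)]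
      have hk : min (m - cnt).toNat (c - i) = min (m - (cnt + 1)).toNat (c - (i + 1)) + 1 := by
        omega
      rw [hk]
      simp only [Nat.cast_add, Nat.cast_one, Prod.mk.injEq]
      constructor <;> omega
    · unfold whileA
      rw [dif_neg hcond]
      have hk : min (m - cnt).toNat (c - i) = 0 := by
        by_cases h1 : (cnt : Int) < m
        · by_cases h2 : i < crew.length
          · have h3 : ¬ crew.getD i 0 ≤ tm := by tauto
            have hgetD : crew.getD i 0 = crew[i] := List.getD_eq_getElem crew 0 h2
            have : c ≤ i := by
              by_contra hlt
              exact h3 (hgetD ▸ hle i (by omega) h2)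
            omega
          · omega
        · omega
      rw [hk]
      simp

theorem step_eq (crew : List Int) (m t : Int) (hm : 0 ≤ m)
    (hsort : crew.Pairwise (· ≤ ·)) (st : Nat × Int) (hst : st.1 ≤ crew.length) (k : Int) :
    stepA crew m st (540 + t * k) = stepB crew m t st k ∧ (stepA crew m st (540 + t * k)).1 ≤ crew.length := by
  obtain ⟨-, hcle, ha3, ha4⟩ :=
    leCountLoop_spec crew (540 + t * k) hsort 0 crew.length (Nat.zero_le _) le_rfl
  set c := leCountLoop crew (540 + t * k) 0 crew.length with hc
  have hw := whileA_eq crew m (540 + t * k) c hcle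
    (fun j h1 hj => ha3 j (Nat.zero_le _) h1 hj)
    (fun j h1 h2 => ha4 j h1 h2 h2)
    st.1 0 hst
  have hb : min m (max 0 ((c : Int) - (st.1 : Int))) = ((min (m - 0).toNat (c - st.1) : Nat) : Int) := by
    push_cast; omega
  have hgoal : stepA crew m st (540 + t * k) = stepB crew m t st k := by
    simp only [stepA, stepB]
    rw [← hc, hw, hb]
    simp
    omega
  refine ⟨hgoal, ?_⟩
  rw [hgoal]
  simp only [stepB]
  rw [← hc, hb]
  simp only [Int.toNat_natCast]
  omega

theorem fold_eq (crew : List Int) (m t : Int) (hm : 0 ≤ m)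
    (hsort : crew.Pairwise (· ≤ ·)) :
    ∀ (L : List Int) (st : Nat × Int), st.1 ≤ crew.length →
      L.foldl (fun acc k => stepA crew m acc (540 + t * k)) st = L.foldl (stepB crew m t) st := by
  intro L
  induction L with
  | nil => intro st _; rfl
  | cons k L ih =>
    intro st hst
    obtain ⟨h1, h2⟩ := step_eq crew m t hm hsort st hst k
    simp only [List.foldl_cons, h1.symm ▸ ih _ h2, h1]

-- ===== VERDICT (by name: the statement is the Claim_ definition above) =====
theorem solution_spec : Claim_equal_solution := by
  intro n t m timetable _ hpre
  unfold Spec_solution solution solution_alt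
  simp only [List.foldl_map]
  rw [fold_eq _ m t hpre.2.1 (PySem.List.sorted_pairwise _ _) _ _ (by simp)]
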